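-- pv_equiv track=rewrite | github.com/YuJinUk/Algorithm | 프로그래머스/lv1/77484. 로또의 최고 순위와 최저 순위/로또의 최고 순위와 최저 순위.py | solution
-- ===== SOURCE A (Python) =====
-- def solution(lottos, win_nums):
--     yes, zero = 0, 0
--     yeslst, answer = [], []
--     for lotto in lottos:
--         if lotto and lotto in win_nums: yes += 1; yeslst.append(lotto)
--         elif not lotto: zero += 1
--     if zero + yes < 2: answer.append(6)
--     else: answer.append(7 - (zero + yes))
--     if yes < 2 : answer.append(6)
--     else: answer.append(7 - yes)
--     return answer
-- ===== SOURCE B (Python) =====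
-- def solution(lottos, win_nums):
--     # Sort both lists and count matches by a two-pointer merge scan
--     # (zeros counted during the same scan over sorted lottos).
--     ws = sorted(win_nums)
--     matched = zeros = 0
--     j = 0
--     for x in sorted(lottos):
--         if x == 0:
--             zeros += 1
--         else:
--             while j < len(ws) and ws[j] < x:
--                 j += 1
--             if j < len(ws) and ws[j] == x:
--                 matched += 1
--     best = 6 if matched + zeros < 2 else 7 - matched - zeros
--     worst = 6 if matched < 2 else 7 - matched
--     return [best, worst]
-- ===== Notes on version B (the rewrite author's own statement) =====
-- stated objective: faster
-- what changed: Replaces the per-element membership scan of win_nums by sorting both lists once and counting matches with a two-pointer merge scan over the sorted lists.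
import Mathlib
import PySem

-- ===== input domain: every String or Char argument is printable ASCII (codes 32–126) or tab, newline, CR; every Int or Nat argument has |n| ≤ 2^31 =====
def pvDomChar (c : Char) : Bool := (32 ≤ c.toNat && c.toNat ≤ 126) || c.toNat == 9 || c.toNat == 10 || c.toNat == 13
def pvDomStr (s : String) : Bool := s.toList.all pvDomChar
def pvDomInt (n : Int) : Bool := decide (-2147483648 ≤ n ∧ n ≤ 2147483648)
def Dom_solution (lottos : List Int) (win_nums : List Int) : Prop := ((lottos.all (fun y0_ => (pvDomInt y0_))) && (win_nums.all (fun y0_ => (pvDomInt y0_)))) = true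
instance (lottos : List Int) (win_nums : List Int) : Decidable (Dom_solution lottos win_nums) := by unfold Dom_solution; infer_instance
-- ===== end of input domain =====

-- ===== PORT A =====
-- A: one loop over lottos accumulating yes/zero (and the unused yeslst) with a
-- membership scan of win_nums per element, then two if/else appends.
def solution (lottos : List Int) (win_nums : List Int) : List Int :=
  let s := lottos.foldl
    (fun (st : Int × Int × List Int) lotto =>
      if lotto ≠ 0 ∧ win_nums.contains lotto then (st.1 + 1, st.2.1, st.2.2 ++ [lotto])
      else if lotto = 0 then (st.1, st.2.1 + 1, st.2.2)
      else st)
    (0, 0, [])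
  let yes := s.1
  let zero := s.2.1
  let a1 : Int := if zero + yes < 2 then 6 else 7 - (zero + yes)
  let a2 : Int := if yes < 2 then 6 else 7 - yes
  [a1, a2]

-- ===== PORT B =====
-- B: sort both lists and count matches with a two-pointer merge scan; the pointer j
-- into the sorted win list is represented by the remaining suffix ws (drop j of it);
-- the inner while loop 'j += 1 while ws[j] < x' is the dropWhile below.
def solution_alt_go (xs ws : List Int) (matched zeros : Int) : Int × Int :=
  match xs with
  | [] => (matched, zeros)
  | x :: t =>
    if x = 0 then solution_alt_go t ws matched (zeros + 1)
    else
      let ws' := ws.dropWhile (fun w => decide (w < x))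
      match ws' with
      | w :: _ => if w = x then solution_alt_go t ws' (matched + 1) zeros
                  else solution_alt_go t ws' matched zeros
      | [] => solution_alt_go t ws' matched zeros

def solution_alt (lottos : List Int) (win_nums : List Int) : List Int :=
  let ws := PySem.List.sorted win_nums (fun x => x) false
  let mz := solution_alt_go (PySem.List.sorted lottos (fun x => x) false) ws 0 0
  let matched := mz.1
  let zeros := mz.2
  let best : Int := if matched + zeros < 2 then 6 else 7 - matched - zeros
  let worst : Int := if matched < 2 then 6 else 7 - matched
  [best, worst]

-- ===== PRECONDITION & SPEC =====
def Spec_solution (lottos : List Int) (win_nums : List Int) (out : List Int) : Prop := out = solution_alt lottos win_nums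
instance (lottos : List Int) (win_nums : List Int) (out : List Int) : Decidable (Spec_solution lottos win_nums out) := by unfold Spec_solution; infer_instance

-- ===== CLAIM =====
def Claim_equal_solution : Prop := ∀ (lottos : List Int) (win_nums : List Int), Dom_solution lottos win_nums → Spec_solution lottos win_nums (solution lottos win_nums)

-- ===== LEMMAS AND PROOFS =====

-- A's loop: the first two components are the countP of matches and the count of zeros.
theorem solution_loop_counts (win_nums : List Int) (lottos : List Int) :
    ∀ (y z : Int) (lst : List Int),
      (lottos.foldl
        (fun (st : Int × Int × List Int) lotto =>
          if lotto ≠ 0 ∧ win_nums.contains lotto then (st.1 + 1, st.2.1, st.2.2 ++ [lotto])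
          else if lotto = 0 then (st.1, st.2.1 + 1, st.2.2)
          else st)
        (y, z, lst)).1
        = y + (lottos.countP (fun x => decide (x ≠ 0 ∧ win_nums.contains x)) : Int)
      ∧
      (lottos.foldl
        (fun (st : Int × Int × List Int) lotto =>
          if lotto ≠ 0 ∧ win_nums.contains lotto then (st.1 + 1, st.2.1, st.2.2 ++ [lotto])
          else if lotto = 0 then (st.1, st.2.1 + 1, st.2.2)
          else st)
        (y, z, lst)).2.1
        = z + (lottos.count 0 : Int) := by
  induction lottos with
  | nil => intro y z lst; simp
  | cons a t ih =>
    intro y z lst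
    rw [List.foldl_cons]
    have hcpt : (a :: t).countP (fun x => decide (x ≠ 0 ∧ win_nums.contains x)) =
        t.countP (fun x => decide (x ≠ 0 ∧ win_nums.contains x)) + (if (a ≠ 0 ∧ win_nums.contains a) then 1 else 0) := by
      rw [List.countP_cons]
      by_cases h : a ≠ 0 ∧ win_nums.contains a <;> simp [h]
    by_cases h : a ≠ 0 ∧ win_nums.contains a
    · rw [if_pos h]
      obtain ⟨h1, h2⟩ := ih (y + 1) z (lst ++ [a])
      refine ⟨?_, ?_⟩
      · rw [h1, hcpt, if_pos h]; push_cast; ring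
      · rw [h2]
        have hc : (a :: t).count 0 = t.count 0 := by
          rw [List.count_cons]; simp [h.1]
        rw [hc]
    · rw [if_neg h]
      by_cases h0 : a = 0
      · rw [if_pos h0]
        obtain ⟨h1, h2⟩ := ih y (z + 1) lst
        refine ⟨?_, ?_⟩
        · rw [h1, hcpt, if_neg h]; push_cast; ring
        · rw [h2]
          have hc : (a :: t).count 0 = t.count 0 + 1 := by
            rw [List.count_cons]; simp [h0]
          rw [hc]; push_cast; ring
      · rw [if_neg h0]
        obtain ⟨h1, h2⟩ := ih y z lst
        refine ⟨?_, ?_⟩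
        · rw [h1, hcpt, if_neg h]; push_cast; ring
        · rw [h2]
          have hc : (a :: t).count 0 = t.count 0 := by
            rw [List.count_cons]; simp [h0]
          rw [hc]

-- Dropping the (< x) prefix does not change membership of any y ≥ x.
theorem mem_dropWhile_lt_iff (ws : List Int) (x y : Int) (hxy : x ≤ y) :
    y ∈ ws.dropWhile (fun w => decide (w < x)) ↔ y ∈ ws := by
  constructor
  · intro h; exact List.IsSuffix.mem h (List.dropWhile_suffix _)
  · intro h
    induction ws with
    | nil => simp at h
    | cons a t ih =>
      by_cases ha : a < x
      · rw [List.dropWhile_cons, if_pos (by simpa using ha)]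
        rcases List.mem_cons.mp h with rfl | ht
        · omega
        · exact ih ht
      · rw [List.dropWhile_cons, if_neg (by simpa using ha)]
        exact h

-- On a sorted ws, the head of dropWhile (< x) equals x iff x ∈ ws.
theorem head_dropWhile_lt_sorted (ws : List Int) (hs : ws.Pairwise (· ≤ ·)) (x : Int) :
    (∃ t, ws.dropWhile (fun w => decide (w < x)) = x :: t) ↔ x ∈ ws := by
  constructor
  · rintro ⟨t, ht⟩
    have : x ∈ ws.dropWhile (fun w => decide (w < x)) := by rw [ht]; exact List.mem_cons_self
    exact (mem_dropWhile_lt_iff ws x x le_rfl).mp this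
  · intro hx
    have hx' : x ∈ ws.dropWhile (fun w => decide (w < x)) :=
      (mem_dropWhile_lt_iff ws x x le_rfl).mpr hx
    rcases hd : ws.dropWhile (fun w => decide (w < x)) with _ | ⟨h, t⟩
    · rw [hd] at hx'; simp at hx'
    · rw [hd] at hx'
      -- head is ≥ x (dropWhile stopped) and ≤ x (sorted, x occurs in the suffix)
      have hge : ¬ (h < x) := by
        have := List.head?_dropWhile_not (fun w => decide (w < x)) ws
        rw [hd] at this; simpa using this
      have hle : h ≤ x := by
        rcases List.mem_cons.mp hx' with hh | hxt
        · omega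
        · have hsuff : (h :: t).Sublist ws := hd ▸ (List.dropWhile_sublist _)
          have hp : (h :: t).Pairwise (· ≤ ·) := hs.sublist hsuff
          exact (List.pairwise_cons.mp hp).1 x hxt
      have hhx : h = x := by omega
      subst hhx
      exact ⟨t, rfl⟩

-- The merge scan counts matches and zeros, for sorted xs.
theorem solution_alt_go_counts (xs : List Int) (hxs : xs.Pairwise (· ≤ ·)) :
    ∀ (ws : List Int), ws.Pairwise (· ≤ ·) → ∀ (m z : Int),
      solution_alt_go xs ws m z
        = (m + (xs.countP (fun x => decide (x ≠ 0 ∧ x ∈ ws)) : Int),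
           z + (xs.count 0 : Int)) := by
  induction xs with
  | nil => intro ws _ m z; simp [solution_alt_go]
  | cons x t ih =>
    intro ws hws m z
    have hx_le : ∀ y ∈ t, x ≤ y := (List.pairwise_cons.mp hxs).1
    have ht : t.Pairwise (· ≤ ·) := (List.pairwise_cons.mp hxs).2
    by_cases hx0 : x = 0
    · subst hx0
      rw [solution_alt_go, if_pos rfl, ih ht ws hws]
      have e1 : (0 :: t).countP (fun x => decide (x ≠ 0 ∧ x ∈ ws)) = t.countP (fun x => decide (x ≠ 0 ∧ x ∈ ws)) := by
        rw [List.countP_cons]; simp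
      have e2 : (0 :: t).count (0:Int) = t.count 0 + 1 := by rw [List.count_cons]; simp
      rw [e1, e2]
      refine Prod.ext rfl ?_
      push_cast; ring
    · rw [solution_alt_go, if_neg hx0]
      have hws'p : (ws.dropWhile (fun w => decide (w < x))).Pairwise (· ≤ ·) :=
        hws.sublist (List.dropWhile_sublist _)
      have hmemt : t.countP (fun y => decide (y ≠ 0 ∧ y ∈ ws.dropWhile (fun w => decide (w < x))))
          = t.countP (fun y => decide (y ≠ 0 ∧ y ∈ ws)) := by
        apply List.countP_congr
        intro y hy
        have h := mem_dropWhile_lt_iff ws x y (hx_le y hy)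
        simp only [decide_eq_true_eq]
        tauto
      have hcnt : ((x :: t).countP (fun y => decide (y ≠ 0 ∧ y ∈ ws)) : Int)
          = (t.countP (fun y => decide (y ≠ 0 ∧ y ∈ ws)) : Int) + (if x ∈ ws then 1 else 0) := by
        rw [List.countP_cons]
        by_cases h : x ∈ ws <;> simp [h, hx0]
      have hcz : (x :: t).count (0:Int) = t.count 0 := by rw [List.count_cons]; simp [hx0]
      rcases hd : ws.dropWhile (fun w => decide (w < x)) with _ | ⟨w, tw⟩
      · have hnx : x ∉ ws := by
          intro hx
          rcases (head_dropWhile_lt_sorted ws hws x).mpr hx with ⟨t', ht'⟩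
          rw [hd] at ht'; simp at ht'
        rw [hd] at hws'p hmemt
        dsimp only
        rw [ih ht [] hws'p, hmemt, hcz]
        refine Prod.ext ?_ rfl
        rw [hcnt, if_neg hnx]; push_cast; ring
      · rw [hd] at hws'p hmemt
        dsimp only
        by_cases hwx : w = x
        · rw [if_pos hwx]
          have hx : x ∈ ws := (head_dropWhile_lt_sorted ws hws x).mp ⟨tw, by rw [hd, hwx]⟩
          rw [ih ht (w :: tw) hws'p, hmemt, hcz]
          refine Prod.ext ?_ rfl
          rw [hcnt, if_pos hx]; push_cast; ring
        · rw [if_neg hwx]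
          have hnx : x ∉ ws := by
            intro hx
            rcases (head_dropWhile_lt_sorted ws hws x).mpr hx with ⟨t', ht'⟩
            rw [hd] at ht'
            injection ht' with hw _
            exact hwx hw
          rw [ih ht (w :: tw) hws'p, hmemt, hcz]
          refine Prod.ext ?_ rfl
          rw [hcnt, if_neg hnx]; push_cast; ring

-- ===== VERDICT =====
theorem solution_spec : Claim_equal_solution := by
  intro lottos win_nums _
  unfold Spec_solution
  simp only [solution, solution_alt]
  obtain ⟨h1, h2⟩ := solution_loop_counts win_nums lottos 0 0 []
  set xs := PySem.List.sorted lottos (fun x => x) false with hxs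
  set ws := PySem.List.sorted win_nums (fun x => x) false with hws
  have hxsp : xs.Pairwise (· ≤ ·) := PySem.List.sorted_pairwise lottos (fun x => x)
  have hwsp : ws.Pairwise (· ≤ ·) := PySem.List.sorted_pairwise win_nums (fun x => x)
  have hgo := solution_alt_go_counts xs hxsp ws hwsp 0 0
  have hpermx : xs.Perm lottos := PySem.List.sorted_perm lottos (fun x => x) false
  have hcp : xs.countP (fun x => decide (x ≠ 0 ∧ x ∈ ws))
      = lottos.countP (fun x => decide (x ≠ 0 ∧ win_nums.contains x)) := by
    rw [hpermx.countP_eq]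
    apply List.countP_congr
    intro y _
    simp only [decide_eq_true_eq]
    simp [hws, PySem.List.mem_sorted]
  have hc0 : xs.count (0:Int) = lottos.count 0 := hpermx.count_eq 0
  rw [h1, h2, hgo, hcp, hc0]
  refine congrArg₂ (fun u v => [u, v]) ?_ ?_ <;> simp <;> split_ifs <;> omega
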